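-- pv_equiv track=rewrite | github.com/guixiangyu1/wiki_embedding1 | data_util.py | entity_in_dataset
-- ===== SOURCE A (Python) =====
-- def get_chunk(tags):
--     """
--
--     :param tags: [O,O,B-LOC,I-LOC,O]
--     :return: [(2,4)]
--     """
--     chunk_start = None
--     entity_chunk = []
--
--     for i, tag in enumerate(tags):
--         if tag.split('-')[0] == 'O' and chunk_start is not None:
--             entity_chunk += [(chunk_start, i)]
--
--             chunk_start = None
--         elif tag.split('-')[0] == 'B':
--             if chunk_start is not None:
--                 entity_chunk += [(chunk_start, i)]
--
--             chunk_start = i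
--         else:
--             pass
--     if chunk_start is not None:
--         entity_chunk += [(chunk_start, len(tags))]
--
--
--     return entity_chunk
--
-- def word_entity(words, entity_chunk):
--     sentence = []
--     entity   = ""
--     entitys  = []
--     for word in words:
--         sentence.append(word.lower())
--     for (entity_start, entity_end) in entity_chunk:
--         for i in range(entity_start, entity_end):
--             entity = entity + sentence[i] + " "
--         entity = entity.strip()
--         entitys.append(entity)
--         entity = ""
--     return entitys
--
-- def entity_in_dataset(all_words, all_tags):
--     all_entity = []
--     for words, tags in zip(all_words, all_tags):
--         entity_chunk = get_chunk(tags)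
--         entitys = word_entity(words, entity_chunk)
--         all_entity += entitys
--     all_entity = set(all_entity)
--     return all_entity
-- ===== SOURCE B (Python) =====
-- def entity_in_dataset(all_words, all_tags):
--     result = set()
--     for words, tags in zip(all_words, all_tags):
--         current = []
--         for i, tag in enumerate(tags):
--             kind = tag.split('-')[0]
--             if kind == 'O':
--                 if current:
--                     result.add(' '.join(current).strip())
--                     current = []
--             elif kind == 'B':
--                 if current:
--                     result.add(' '.join(current).strip())
--                 current = [words[i].lower()]
--             elif current:
--                 current.append(words[i].lower())
--         if current:
--             result.add(' '.join(current).strip())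
--     return result
-- ===== Notes on version B (the rewrite author's own statement) =====
-- stated objective: simpler
-- what changed: Replaces A's two-phase pipeline (first compute (start,end) chunk index pairs per sentence, then re-scan the lowered sentence to concatenate each chunk) by a single pass over the tags that maintains the current chunk's lowered words directly and flushes each phrase into the result set as its chunk closes.
import Mathlib
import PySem

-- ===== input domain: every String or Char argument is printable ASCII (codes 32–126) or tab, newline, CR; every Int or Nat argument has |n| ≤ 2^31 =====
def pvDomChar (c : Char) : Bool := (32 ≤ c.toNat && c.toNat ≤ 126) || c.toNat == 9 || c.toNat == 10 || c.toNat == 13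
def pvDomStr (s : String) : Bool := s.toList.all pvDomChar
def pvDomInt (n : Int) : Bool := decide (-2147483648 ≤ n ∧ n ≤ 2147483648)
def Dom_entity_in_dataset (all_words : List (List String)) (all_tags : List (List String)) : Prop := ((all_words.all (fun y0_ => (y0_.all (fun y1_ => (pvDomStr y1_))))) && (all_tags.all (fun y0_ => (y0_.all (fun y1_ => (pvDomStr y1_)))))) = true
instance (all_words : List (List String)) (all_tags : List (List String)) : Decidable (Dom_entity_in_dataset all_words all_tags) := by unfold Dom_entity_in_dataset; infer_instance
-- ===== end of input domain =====

-- B replaces A's two-phase pipeline (chunk index pairs, then a re-scan that joins each chunk)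
-- by a single pass that keeps the open chunk's lowered words and flushes phrases into the set
-- as chunks close: a simpler decomposition computing the same set.


-- tag.split('-')[0] (shared by both ports: the one primitive both Pythons use verbatim)
def kindOf (t : String) : String := ((PySem.Str.split? t "-").getD []).headD ""

-- ===== PORT A =====
-- the loop body of get_chunk: state = (chunk_start, entity_chunk)
def stepA (st : Option Int × List (Int × Int)) (it : Int × String) : Option Int × List (Int × Int) :=
  if kindOf it.2 = "O" then
    match st.1 with
    | some s => (none, st.2 ++ [(s, it.1)])
    | none => st            -- 'elif B' is false here, so: pass
  else if kindOf it.2 = "B" then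
    match st.1 with
    | some s => (some it.1, st.2 ++ [(s, it.1)])
    | none => (some it.1, st.2)
  else st                   -- pass

def get_chunk (tags : List String) : List (Int × Int) :=
  let st := (PySem.List.enumerate tags).foldl stepA (none, [])
  match st.1 with
  | some s => st.2 ++ [(s, (tags.length : Int))]
  | none => st.2

def word_entity (words : List String) (entity_chunk : List (Int × Int)) : List String :=
  let sentence := words.map PySem.Str.lower
  entity_chunk.foldl (fun entitys se =>
    let entity := (PySem.List.pyRange se.1 se.2 1).foldl
      (fun e i => e ++ (PySem.List.pyGet? sentence i).getD "" ++ " ") ""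
    entitys ++ [PySem.Str.strip entity]) []

def entity_in_dataset (all_words : List (List String)) (all_tags : List (List String)) : List String :=
  PySem.Set.ofList ((all_words.zip all_tags).foldl
    (fun acc wt => acc ++ word_entity wt.1 (get_chunk wt.2)) [])

-- ===== PORT B =====
def phraseB (current : List String) : String := PySem.Str.strip (PySem.Str.join " " current)

-- the inner loop body of B: state = (result, current)
def stepB (words : List String) (st : PySem.Set String × List String) (it : Int × String) :
    PySem.Set String × List String :=
  let kind := kindOf it.2
  if kind = "O" then
    if st.2 ≠ [] then (PySem.Set.add st.1 (phraseB st.2), []) else st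
  else if kind = "B" then
    ((if st.2 ≠ [] then PySem.Set.add st.1 (phraseB st.2) else st.1),
     [PySem.Str.lower ((PySem.List.pyGet? words it.1).getD "")])
  else if st.2 ≠ [] then
    (st.1, st.2 ++ [PySem.Str.lower ((PySem.List.pyGet? words it.1).getD "")])
  else st

def entity_in_dataset_alt (all_words : List (List String)) (all_tags : List (List String)) : List String :=
  (all_words.zip all_tags).foldl (fun result wt =>
    let st := (PySem.List.enumerate wt.2).foldl (stepB wt.1) (result, [])
    if st.2 ≠ [] then PySem.Set.add st.1 (phraseB st.2) else st.1) PySem.Set.empty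

-- ===== PRECONDITION & SPEC =====
-- position i of tags lies inside some chunk (a 'B' at j ≤ i with no 'O' in between)
def chunkPosB (tags : List String) (i : Nat) : Bool :=
  (List.range (i+1)).any (fun j =>
    (kindOf (tags.getD j "") == "B") &&
    (List.range (i+1)).all (fun k => !(decide (j < k)) || (kindOf (tags.getD k "") != "O")))

-- Pre_ excludes exactly the inputs where Python A raises IndexError: some chunk position
-- of a tag sequence reaches past the end of its word list.
def Pre_entity_in_dataset (all_words : List (List String)) (all_tags : List (List String)) : Prop :=
  ∀ p ∈ all_words.zip all_tags, ∀ i, i < p.2.length → chunkPosB p.2 i = true → i < p.1.length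
instance (all_words : List (List String)) (all_tags : List (List String)) : Decidable (Pre_entity_in_dataset all_words all_tags) := by unfold Pre_entity_in_dataset; infer_instance

def pvWitness_entity_in_dataset : List (List String) × List (List String) :=
  ([["Barack", "Obama", "visited"], ["x"]], [["B-PER", "I-PER", "O"], ["O"]])

def Spec_entity_in_dataset (all_words : List (List String)) (all_tags : List (List String)) (out : List String) : Prop := out = entity_in_dataset_alt all_words all_tags
instance (all_words : List (List String)) (all_tags : List (List String)) (out : List String) : Decidable (Spec_entity_in_dataset all_words all_tags out) := by unfold Spec_entity_in_dataset; infer_instance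

-- ===== CLAIM (what is proved, stated in full; the proofs are below) =====
def Claim_equal_entity_in_dataset : Prop := ∀ (all_words : List (List String)) (all_tags : List (List String)), Dom_entity_in_dataset all_words all_tags → Pre_entity_in_dataset all_words all_tags → Spec_entity_in_dataset all_words all_tags (entity_in_dataset all_words all_tags)

-- ===== LEMMAS AND PROOFS =====

-- proof-only helpers: the word at index i as both ports see it, the open chunk's words,
-- and the phrase A computes for one chunk
def wAt (words : List String) (i : Int) : String :=
  PySem.Str.lower ((PySem.List.pyGet? words i).getD "")

def curOf (words : List String) (cs : Option Int) (n : Int) : List String :=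
  match cs with
  | none => []
  | some s => (PySem.List.pyRange s n 1).map (wAt words)

def phrA (words : List String) (se : Int × Int) : String :=
  PySem.Str.strip ((PySem.List.pyRange se.1 se.2 1).foldl (fun e i => e ++ wAt words i ++ " ") "")

-- character-level: the concatenation A builds for one chunk, with a trailing space per word
def bodyC : List (List Char) → List Char
  | [] => []
  | x :: t => x ++ ' ' :: bodyC t

lemma foldC (ls : List (List Char)) : ∀ (z : List Char),
    ls.foldl (fun e x => e ++ x ++ [' ']) z = z ++ bodyC ls := by
  induction ls with
  | nil => intro z; simp [bodyC]
  | cons x t ih =>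
    intro z
    rw [List.foldl_cons, ih]
    simp [bodyC]

lemma bodyC_eq (ls : List (List Char)) (h : ls ≠ []) :
    bodyC ls = PySem.Chars.join [' '] ls ++ [' '] := by
  induction ls with
  | nil => exact absurd rfl h
  | cons x t ih =>
    cases t with
    | nil => simp [bodyC, PySem.Chars.join_singleton]
    | cons y u =>
      rw [show bodyC (x :: y :: u) = x ++ ' ' :: bodyC (y :: u) from rfl,
          ih (by simp), PySem.Chars.join_cons_cons]
      simp

lemma lstrip_append (l m : List Char) :
    PySem.Chars.lstrip (l ++ m) =
      if PySem.Chars.lstrip l = [] then PySem.Chars.lstrip m else PySem.Chars.lstrip l ++ m := by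
  induction l with
  | nil => simp [PySem.Chars.lstrip]
  | cons c t ih =>
    by_cases hc : PySem.Chars.isspace c = true
    · simpa [PySem.Chars.lstrip, List.dropWhile, hc] using ih
    · simp [PySem.Chars.lstrip, List.dropWhile, hc]

lemma rstrip_append_space (l : List Char) :
    PySem.Chars.rstrip (l ++ [' ']) = PySem.Chars.rstrip l := by
  simp [PySem.Chars.rstrip, show PySem.Chars.isspace ' ' = true from by decide]

lemma strip_append_space (l : List Char) :
    PySem.Chars.strip (l ++ [' ']) = PySem.Chars.strip l := by
  show PySem.Chars.rstrip (PySem.Chars.lstrip (l ++ [' '])) = _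
  rw [lstrip_append]
  split_ifs with h
  · show _ = PySem.Chars.rstrip (PySem.Chars.lstrip l)
    rw [h]
    decide
  · rw [rstrip_append_space]
    rfl

lemma toList_foldl_sp (ls : List String) : ∀ (z : String),
    (ls.foldl (fun e x => e ++ x ++ " ") z).toList =
      (ls.map String.toList).foldl (fun e x => e ++ x ++ [' ']) z.toList := by
  induction ls with
  | nil => intro z; simp
  | cons x t ih =>
    intro z
    simp only [List.foldl_cons, List.map_cons, ih, String.toList_append]
    rfl

lemma strip_fold_eq_phraseB (ws : List String) :
    PySem.Str.strip (ws.foldl (fun e x => e ++ x ++ " ") "") = phraseB ws := by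
  apply String.toList_inj.mp
  rw [PySem.Str.toList_strip, toList_foldl_sp]
  unfold phraseB
  rw [PySem.Str.toList_strip, PySem.Str.toList_join]
  cases hws : ws.map String.toList with
  | nil => simp
  | cons x t =>
    rw [foldC, bodyC_eq _ (by simp), ← hws]
    show PySem.Chars.strip ("".toList ++ _) = _
    simp only [String.toList_empty, List.nil_append]
    rw [strip_append_space]
    rfl

lemma phrA_eq_phraseB (words : List String) (s e : Int) :
    phrA words (s, e) = phraseB ((PySem.List.pyRange s e 1).map (wAt words)) := by
  unfold phrA
  rw [← strip_fold_eq_phraseB, List.foldl_map]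

lemma word_entity_eq_map (words : List String) (chs : List (Int × Int)) :
    word_entity words chs = chs.map (phrA words) := by
  have h0 : PySem.Str.lower "" = "" := by decide
  have hw : ∀ i : Int, (PySem.List.pyGet? (words.map PySem.Str.lower) i).getD "" = wAt words i := by
    intro i
    have := PySem.List.pyGetD_map PySem.Str.lower words i ""
    rw [h0] at this
    simpa [PySem.List.pyGetD, wAt] using this
  unfold word_entity
  simp only [hw]
  exact PySem.List.foldl_append_singleton_eq_map (phrA words) chs []

lemma update_append {res : PySem.Set String} (xs ys : List String) :
    PySem.Set.update res (xs ++ ys) = PySem.Set.update (PySem.Set.update res xs) ys := by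
  simp [PySem.Set.update, List.foldl_append]

lemma update_singleton {res : PySem.Set String} (x : String) :
    PySem.Set.update res [x] = PySem.Set.add res x := rfl

lemma stepA_shift (cs : Option Int) (ec : List (Int × Int)) (it : Int × String) :
    stepA (cs, ec) it = ((stepA (cs, []) it).1, ec ++ (stepA (cs, []) it).2) := by
  unfold stepA
  split_ifs <;> cases cs <;> simp

lemma foldA_shift (l : List (Int × String)) : ∀ (cs : Option Int) (ec : List (Int × Int)),
    l.foldl stepA (cs, ec) = ((l.foldl stepA (cs, [])).1, ec ++ (l.foldl stepA (cs, [])).2) := by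
  induction l with
  | nil => intro cs ec; simp
  | cons it t ih =>
    intro cs ec
    simp only [List.foldl_cons]
    rw [stepA_shift cs ec it, ih]
    conv_rhs => rw [← Prod.mk.eta (p := stepA (cs, []) it), ih]
    simp [List.append_assoc]

lemma pyRange_empty {a b : Int} (h : b ≤ a) : PySem.List.pyRange a b 1 = [] := by
  simp [PySem.List.pyRange]
  omega

-- the core single-sentence invariant: B's running (set, current-chunk) state tracks A's
-- (chunk_start, chunk-list) state
lemma coreB (words : List String) : ∀ (tags : List String) (n : Int) (cs : Option Int)
    (res : PySem.Set String), (∀ s, cs = some s → s < n) →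
    ((PySem.List.enumerate tags n).foldl (stepB words) (res, curOf words cs n) =
      (PySem.Set.update res
          ((((PySem.List.enumerate tags n).foldl stepA (cs, [])).2).map (phrA words)),
        curOf words (((PySem.List.enumerate tags n).foldl stepA (cs, [])).1) (n + tags.length)))
    ∧ (∀ s, ((PySem.List.enumerate tags n).foldl stepA (cs, [])).1 = some s → s < n + tags.length) := by
  intro tags
  induction tags with
  | nil =>
    intro n cs res h
    refine ⟨?_, ?_⟩
    · simp [PySem.List.enumerate_nil, PySem.Set.update]
    · intro s hs
      have := h s (by simpa [PySem.List.enumerate_nil] using hs)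
      simpa using by omega
  | cons tg ts ih =>
    intro n cs res h
    have hlen : n + (((tg :: ts).length : Nat) : Int) = (n + 1) + ((ts.length : Nat) : Int) := by
      simp only [List.length_cons]
      push_cast
      ring
    rw [PySem.List.enumerate_cons, hlen]
    simp only [List.foldl_cons]
    by_cases hO : kindOf tg = "O"
    · cases cs with
      | none =>
        have hA : stepA (none, ([] : List (Int × Int))) (n, tg) = (none, []) := by
          simp [stepA, hO]
        have hB : stepB words (res, curOf words none n) (n, tg) = (res, curOf words none (n + 1)) := by
          simp [stepB, hO, curOf]
        rw [hA, hB]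
        exact ih (n + 1) none res (by simp)
      | some s =>
        have hs := h s rfl
        have hcur : curOf words (some s) n ≠ [] := by
          simp [curOf, PySem.List.pyRange_one_cons hs]
        have hA : stepA (some s, ([] : List (Int × Int))) (n, tg) = (none, [(s, n)]) := by
          simp [stepA, hO]
        have hB : stepB words (res, curOf words (some s) n) (n, tg) =
            (PySem.Set.add res (phraseB (curOf words (some s) n)), curOf words none (n + 1)) := by
          rw [show curOf words none (n + 1) = [] from rfl]
          simp [stepB, hO, hcur]
        rw [hA, hB]
        have hIH := ih (n + 1) none (PySem.Set.add res (phraseB (curOf words (some s) n))) (by simp)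
        rw [foldA_shift _ none [(s, n)]]
        refine ⟨?_, ?_⟩
        · rw [hIH.1]
          simp only [List.map_append, List.map_cons, List.map_nil]
          rw [update_append, update_singleton, phrA_eq_phraseB]
          rfl
        · exact hIH.2
    · by_cases hBtag : kindOf tg = "B"
      · have hnew : [PySem.Str.lower ((PySem.List.pyGet? words n).getD "")] =
            curOf words (some n) (n + 1) := by
          simp [curOf, wAt, PySem.List.pyRange_one_cons (show n < n + 1 by omega),
            pyRange_empty (le_refl (n + 1))]
        cases cs with
        | none =>
          have hA : stepA (none, ([] : List (Int × Int))) (n, tg) = (some n, []) := by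
            simp [stepA, hBtag]
          have hB : stepB words (res, curOf words none n) (n, tg) =
              (res, curOf words (some n) (n + 1)) := by
            rw [← hnew]
            simp [stepB, hBtag, curOf]
          rw [hA, hB]
          exact ih (n + 1) (some n) res (by intro s hs; cases hs; omega)
        | some s =>
          have hs := h s rfl
          have hcur : curOf words (some s) n ≠ [] := by
            simp [curOf, PySem.List.pyRange_one_cons hs]
          have hA : stepA (some s, ([] : List (Int × Int))) (n, tg) = (some n, [(s, n)]) := by
            simp [stepA, hBtag]
          have hB : stepB words (res, curOf words (some s) n) (n, tg) =
              (PySem.Set.add res (phraseB (curOf words (some s) n)), curOf words (some n) (n + 1)) := by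
            rw [← hnew]
            simp [stepB, hBtag, hcur]
          rw [hA, hB]
          have hIH := ih (n + 1) (some n)
            (PySem.Set.add res (phraseB (curOf words (some s) n)))
            (by intro s' hs'; cases hs'; omega)
          rw [foldA_shift _ (some n) [(s, n)]]
          refine ⟨?_, ?_⟩
          · rw [hIH.1]
            simp only [List.map_append, List.map_cons, List.map_nil]
            rw [update_append, update_singleton, phrA_eq_phraseB]
            rfl
          · exact hIH.2
      · cases cs with
        | none =>
          have hA : stepA (none, ([] : List (Int × Int))) (n, tg) = (none, []) := by
            simp [stepA, hO, hBtag]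
          have hB : stepB words (res, curOf words none n) (n, tg) = (res, curOf words none (n + 1)) := by
            simp [stepB, hO, hBtag, curOf]
          rw [hA, hB]
          exact ih (n + 1) none res (by simp)
        | some s =>
          have hs := h s rfl
          have hA : stepA (some s, ([] : List (Int × Int))) (n, tg) = (some s, []) := by
            simp [stepA, hO, hBtag]
          have hcur : curOf words (some s) n ≠ [] := by
            simp [curOf, PySem.List.pyRange_one_cons hs]
          have hB : stepB words (res, curOf words (some s) n) (n, tg) =
              (res, curOf words (some s) (n + 1)) := by
            have hr : curOf words (some s) (n + 1) =
                curOf words (some s) n ++ [wAt words n] := by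
              simp [curOf, PySem.List.pyRange_one_succ_right (le_of_lt hs)]
            rw [hr]
            simp [stepB, hO, hBtag, hcur, wAt]
          rw [hA, hB]
          exact ih (n + 1) (some s) res (by intro s' hs'; cases hs'; omega)

-- one sentence of B's outer loop = res updated with A's phrase list for that sentence
lemma sentenceEq (words tags : List String) (res : PySem.Set String) :
    (let st := (PySem.List.enumerate tags).foldl (stepB words) (res, [])
     if st.2 ≠ [] then PySem.Set.add st.1 (phraseB st.2) else st.1) =
    PySem.Set.update res (word_entity words (get_chunk tags)) := by
  obtain ⟨h1, h2⟩ := coreB words tags 0 none res (by simp)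
  rw [show curOf words none 0 = ([] : List String) from rfl] at h1
  rw [word_entity_eq_map]
  cases hcs : ((PySem.List.enumerate tags 0).foldl stepA (none, [])).1 with
  | none =>
    rw [hcs] at h1
    simp only [get_chunk, h1, hcs, curOf, ne_eq, not_true_eq_false, if_false]
  | some s =>
    have hs : s < 0 + (tags.length : Int) := h2 s hcs
    have hs' : s < (tags.length : Int) := by omega
    have hcur : curOf words (some s) (0 + (tags.length : Int)) ≠ [] := by
      simp [curOf, PySem.List.pyRange_one_cons hs']
    rw [hcs] at h1
    simp only [get_chunk, h1, hcs, ne_eq, hcur, not_false_eq_true, if_true]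
    rw [List.map_append, update_append]
    simp only [List.map_cons, List.map_nil]
    rw [update_singleton, phrA_eq_phraseB]
    simp [curOf]

lemma outerEq : ∀ (pairs : List (List String × List String)) (res : PySem.Set String),
    pairs.foldl (fun result wt =>
        let st := (PySem.List.enumerate wt.2).foldl (stepB wt.1) (result, [])
        if st.2 ≠ [] then PySem.Set.add st.1 (phraseB st.2) else st.1) res
      = PySem.Set.update res
          (pairs.foldl (fun acc wt => acc ++ word_entity wt.1 (get_chunk wt.2)) []) := by
  intro pairs
  induction pairs with
  | nil => intro res; simp [PySem.Set.update]
  | cons p t ih =>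
    intro res
    simp only [List.foldl_cons, List.nil_append]
    rw [ih, PySem.List.foldl_append_eq_flatMap, PySem.List.foldl_append_eq_flatMap,
        List.nil_append, update_append]
    congr 1
    exact sentenceEq p.1 p.2 res

-- ===== VERDICT (by name: the statement is the Claim_ definition above) =====
theorem entity_in_dataset_spec : Claim_equal_entity_in_dataset := by
  intro all_words all_tags _ _
  unfold Spec_entity_in_dataset entity_in_dataset entity_in_dataset_alt
  rw [outerEq, PySem.List.foldl_append_eq_flatMap, List.nil_append]
  rfl
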